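-- pv_equiv track=rewrite | github.com/vladc15/SoccerAnalytics | passing_motifs.py | encode_motif_player_centric
-- ===== SOURCE A (Python) =====
-- def encode_motif_player_centric(players, target_player):
--     """
--     Encodes motif with target_player always mapped to 'A'.
--     Other players get B, C, D in order of appearance.
--     This makes motifs meaningful per player:
--       ABA = target receives, passes, receives again (pivot)
--       ABC = target passes to two different players
--       BAC = target is in the middle of an exchange
--       BAB = target receives from B and passes back to B
--     """
--     mapping = {target_player: "A"}
--     letters = "BCDEFGHIJKLMNOPQRSTUVWXYZ"
--     idx = 0
--     encoded = []
--     for p in players: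
--         if p not in mapping:
--             mapping[p] = letters[idx]
--             idx += 1
--         encoded.append(mapping[p])
--     return "".join(encoded)
-- ===== SOURCE B (Python) =====
-- def encode_motif_player_centric(players, target_player):
--     """Dictionary-free version: each letter is computed directly per position from
--     the first-occurrence index of the player and the count of distinct earlier
--     non-target players (no incremental mapping is maintained)."""
--     letters = "BCDEFGHIJKLMNOPQRSTUVWXYZ"
--
--     def code(p):
--         if p == target_player:
--             return "A"
--         j = players.index(p)
--         return letters[len({q for q in players[:j] if q != target_player})]
--
--     return "".join(code(p) for p in players)
-- ===== Notes on version B (the rewrite author's own statement) =====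
-- stated objective: alternative
-- what changed: B drops A's incrementally-built player-to-letter dictionary entirely: each position's letter is computed independently as a closed form from the player's first-occurrence index (players.index) and the count of distinct non-target players in the prefix before it, trading A's O(n) stateful single pass for a stateless per-position formula.
import Mathlib
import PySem

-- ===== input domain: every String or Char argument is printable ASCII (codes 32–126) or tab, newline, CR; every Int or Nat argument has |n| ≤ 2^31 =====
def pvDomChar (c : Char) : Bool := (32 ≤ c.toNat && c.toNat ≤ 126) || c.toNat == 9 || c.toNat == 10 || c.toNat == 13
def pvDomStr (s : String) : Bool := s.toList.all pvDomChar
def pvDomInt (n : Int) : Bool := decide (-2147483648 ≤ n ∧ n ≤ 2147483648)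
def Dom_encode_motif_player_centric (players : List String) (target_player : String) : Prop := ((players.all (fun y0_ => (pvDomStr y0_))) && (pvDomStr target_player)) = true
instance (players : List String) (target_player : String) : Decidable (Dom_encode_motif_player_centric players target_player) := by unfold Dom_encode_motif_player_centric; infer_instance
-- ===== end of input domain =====

-- B computes each position's letter by a stateless per-position closed form (first-occurrence
-- index + count of distinct earlier non-target players) instead of A's incrementally-built
-- dictionary (objective: alternative; B is not faster).


-- letters[idx] — Python's 1-char strings are modelled as Char
def pvLetter (idx : Int) : Char := (PySem.Str.pyGet? "BCDEFGHIJKLMNOPQRSTUVWXYZ" idx).getD '?'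

-- ===== PORT A =====
-- loop body of A: if p not in mapping: mapping[p] = letters[idx]; idx += 1; encoded.append(mapping[p])
def pvStepA (st : PySem.Dict String Char × Int × List Char) (p : String) :
    PySem.Dict String Char × Int × List Char :=
  if st.1.contains p then (st.1, st.2.1, st.2.2 ++ [st.1.getD p '?'])
  else
    let m' := st.1.insert p (pvLetter st.2.1)
    (m', st.2.1 + 1, st.2.2 ++ [m'.getD p '?'])

def encode_motif_player_centric (players : List String) (target_player : String) : String :=
  let res := players.foldl pvStepA (PySem.Dict.ofList [(target_player, 'A')], 0, [])
  String.ofList res.2.2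

-- ===== PORT B =====
-- B's helper code(p): 'A' for the target, else letters[len({q for q in players[:j] if q != target})]
-- with j = players.index(p); j is always found because code is only applied to members of players,
-- so the Option from index? is unwrapped with getD 0 (never taken). players[:j] with j ≥ 0 is take j.
def pvCodeB (players : List String) (target_player : String) (p : String) : Char :=
  if p = target_player then 'A'
  else
    let j := (PySem.List.index? players p).getD 0
    pvLetter (((PySem.Set.ofList ((players.take j).filter (fun q => q ≠ target_player))).length : Int))

def encode_motif_player_centric_alt (players : List String) (target_player : String) : String :=
  String.ofList (players.map (pvCodeB players target_player))

-- ===== PRECONDITION & SPEC =====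
-- Pre_ excludes inputs with more than 25 distinct non-target players: there Python A raises
-- IndexError on letters[idx] (and Python B raises the same IndexError in letters[...]).
def Pre_encode_motif_player_centric (players : List String) (target_player : String) : Prop :=
  ((PySem.List.dedup players).filter (fun p => p ≠ target_player)).length ≤ 25
instance (players : List String) (target_player : String) : Decidable (Pre_encode_motif_player_centric players target_player) := by unfold Pre_encode_motif_player_centric; infer_instance
def pvWitness_encode_motif_player_centric : List String × String := (["x", "y", "x", "z"], "x")

def Spec_encode_motif_player_centric (players : List String) (target_player : String) (out : String) : Prop := out = encode_motif_player_centric_alt players target_player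
instance (players : List String) (target_player : String) (out : String) : Decidable (Spec_encode_motif_player_centric players target_player out) := by unfold Spec_encode_motif_player_centric; infer_instance

-- ===== CLAIM (what is proved, stated in full; the proofs are below) =====
def Claim_equal_encode_motif_player_centric : Prop := ∀ (players : List String) (target_player : String), Dom_encode_motif_player_centric players target_player → Pre_encode_motif_player_centric players target_player → Spec_encode_motif_player_centric players target_player (encode_motif_player_centric players target_player)

-- ===== LEMMAS AND PROOFS =====

-- the full table A would have built: target ↦ 'A', then the k-th distinct non-target ↦ letters[k]
def pvBuildMap (target_player : String) (others : List String) : PySem.Dict String Char :=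
  (PySem.List.enumerate others).foldl
    (fun m ip => m.insert ip.2 (pvLetter ip.1))
    (PySem.Dict.ofList [(target_player, 'A')])

-- the set of players already assigned a letter, threaded through a traversal of xs
def pvSeen (t : String) (xs : List String) (s : List String) : List String :=
  xs.foldl (fun s p => if p = t ∨ p ∈ s then s else s ++ [p]) s

lemma pvSeen_eq_update (t : String) (xs : List String) (s : List String) :
    pvSeen t xs s = PySem.Set.update s (xs.filter (fun p => p ≠ t)) := by
  induction xs generalizing s with
  | nil => rfl
  | cons x xs ih =>
    by_cases hx : x = t
    · have h1 : pvSeen t (x :: xs) s = pvSeen t xs s := by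
        simp only [pvSeen, List.foldl_cons, if_pos (Or.inl hx)]
      rw [h1, ih, List.filter_cons]
      simp [hx]
    · have h1 : pvSeen t (x :: xs) s = pvSeen t xs (if x ∈ s then s else s ++ [x]) := by
        by_cases hm : x ∈ s
        · simp only [pvSeen, List.foldl_cons, if_pos (Or.inr hm), if_pos hm]
        · simp only [pvSeen, List.foldl_cons, if_neg hm,
            if_neg (fun h => Or.elim h (fun h1 => hx h1) (fun h2 => hm h2))]
      rw [h1, ih, List.filter_cons]
      simp only [hx, decide_not, ne_eq, not_false_iff, decide_true, if_true]
      rw [PySem.Set.update_cons, PySem.Set.add_eq_ite]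

lemma pvSeen_prefix (t : String) (xs : List String) (s : List String) :
    s <+: pvSeen t xs s := by
  induction xs generalizing s with
  | nil => exact List.prefix_refl s
  | cons x xs ih =>
    show s <+: pvSeen t xs (if x = t ∨ x ∈ s then s else s ++ [x])
    split_ifs with h
    · exact ih s
    · exact List.IsPrefix.trans (List.prefix_append s [x]) (ih (s ++ [x]))

lemma pvFilter_ofList (q : String → Bool) (xs : List String) :
    (PySem.Set.ofList xs).filter q = PySem.Set.ofList (xs.filter q) := by
  induction xs using List.reverseRecOn with
  | nil => rfl
  | append_singleton xs x ih =>
    rw [PySem.Set.ofList_append_singleton, List.filter_append]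
    by_cases hx : x ∈ xs
    · have hx' : x ∈ PySem.Set.ofList xs := (PySem.Set.mem_ofList xs x).2 hx
      rw [PySem.Set.add_of_mem hx', ih]
      by_cases hq : q x = true
      · have hxf : x ∈ PySem.Set.ofList (xs.filter q) :=
          (PySem.Set.mem_ofList _ x).2 (List.mem_filter.2 ⟨hx, hq⟩)
        rw [show List.filter q [x] = [x] by simp [hq],
          PySem.Set.ofList_append_singleton, PySem.Set.add_of_mem hxf]
      · rw [show List.filter q [x] = [] by simp [hq], List.append_nil]
    · have hx' : x ∉ PySem.Set.ofList xs := fun h => hx ((PySem.Set.mem_ofList xs x).1 h)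
      rw [PySem.Set.add_of_not_mem hx', List.filter_append, ih]
      by_cases hq : q x = true
      · have hxf : x ∉ PySem.Set.ofList (xs.filter q) :=
          fun h => hx (List.mem_filter.1 ((PySem.Set.mem_ofList _ x).1 h)).1
        rw [show List.filter q [x] = [x] by simp [hq],
          PySem.Set.ofList_append_singleton, PySem.Set.add_of_not_mem hxf]
      · rw [show List.filter q [x] = [] by simp [hq], List.append_nil, List.append_nil]

lemma pvBuildMap_nil (t : String) : pvBuildMap t [] = PySem.Dict.ofList [(t, 'A')] := rfl

lemma pvEnumerate_append_singleton {α : Type} (l : List α) (x : α) (s : Int) :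
    PySem.List.enumerate (l ++ [x]) s = PySem.List.enumerate l s ++ [(s + l.length, x)] := by
  induction l generalizing s with
  | nil => simp [PySem.List.enumerate_cons, PySem.List.enumerate_nil]
  | cons a l ih =>
    simp [PySem.List.enumerate_cons, ih]
    ring_nf

lemma pvBuildMap_snoc (t : String) (l : List String) (x : String) :
    pvBuildMap t (l ++ [x]) = (pvBuildMap t l).insert x (pvLetter l.length) := by
  unfold pvBuildMap
  rw [pvEnumerate_append_singleton, List.foldl_append]
  simp

lemma pvBuildMap_getD_target (t : String) (l : List String) (ht : t ∉ l) :
    (pvBuildMap t l).getD t '?' = 'A' := by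
  induction l using List.reverseRecOn with
  | nil =>
    show ((PySem.Dict.empty).insert t 'A').getD t '?' = 'A'
    exact PySem.Dict.getD_insert_self _ _ _ _
  | append_singleton l x ih =>
    have hx : t ≠ x := fun h => ht (by simp [h])
    rw [pvBuildMap_snoc, PySem.Dict.getD_insert_of_ne _ _ _ hx]
    exact ih (fun h => ht (by simp [h]))

lemma pvBuildMap_getD_mem (t : String) (l : List String) (hnd : l.Nodup)
    (i : Nat) (hi : i < l.length) :
    (pvBuildMap t l).getD l[i] '?' = pvLetter i := by
  induction l using List.reverseRecOn with
  | nil => simp at hi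
  | append_singleton l x ih =>
    rw [pvBuildMap_snoc]
    rcases Nat.lt_or_ge i l.length with h | h
    · have hne : (l ++ [x])[i] ≠ x := by
        rw [List.getElem_append_left h]
        intro hcontra
        exact (List.disjoint_of_nodup_append hnd) (hcontra ▸ l.getElem_mem h) (by simp)
      rw [PySem.Dict.getD_insert_of_ne _ _ _ hne, List.getElem_append_left h]
      exact ih (List.Nodup.of_append_left hnd) h
    · have hi' : i = l.length := by
        have := hi; simp at this; omega
      subst hi'
      rw [List.getElem_append_right (le_refl _)]
      simp [PySem.Dict.getD_insert_self]

lemma pvBuildMap_contains (t : String) (l : List String) (p : String) :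
    (pvBuildMap t l).contains p = true ↔ p = t ∨ p ∈ l := by
  induction l using List.reverseRecOn with
  | nil =>
    show ((PySem.Dict.empty).insert t 'A').contains p = true ↔ _
    rw [PySem.Dict.contains_insert]
    simp [PySem.Dict.empty, PySem.Dict.contains]
  | append_singleton l x ih =>
    rw [pvBuildMap_snoc, PySem.Dict.contains_insert]
    simp only [Bool.or_eq_true, beq_iff_eq, ih, List.mem_append, List.mem_singleton]
    tauto

-- main invariant: A's loop, started after the first k distinct non-target players were assigned,
-- appends exactly the table lookups
lemma pvMainA (t : String) (others : List String)
    (hnd : others.Nodup) (hnt : ∀ p ∈ others, p ≠ t) :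
    ∀ (xs : List String) (k : Nat) (enc : List Char),
      pvSeen t xs (others.take k) = others →
      (xs.foldl pvStepA (pvBuildMap t (others.take k), (k : Int), enc)).2.2
        = enc ++ xs.map (fun p => (pvBuildMap t others).getD p '?') := by
  intro xs
  induction xs with
  | nil => intro k enc _; simp
  | cons x xs ih =>
    intro k enc hseen
    by_cases hc : (pvBuildMap t (others.take k)).contains x = true
    · -- x already has a letter
      have hmem : x = t ∨ x ∈ others.take k := (pvBuildMap_contains t _ x).1 hc
      have hseen' : pvSeen t xs (others.take k) = others := by
        have hstep : pvSeen t (x :: xs) (others.take k) = pvSeen t xs (others.take k) := by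
          simp only [pvSeen, List.foldl_cons, if_pos hmem]
        rw [← hstep]; exact hseen
      have hval : (pvBuildMap t (others.take k)).getD x '?'
          = (pvBuildMap t others).getD x '?' := by
        rcases hmem with h | h
        · have h1 : t ∉ others.take k := fun hm => hnt t (List.mem_of_mem_take hm) rfl
          have h2 : t ∉ others := fun hm => hnt t hm rfl
          rw [h, pvBuildMap_getD_target t _ h1, pvBuildMap_getD_target t _ h2]
        · obtain ⟨i, hi, hx⟩ := List.mem_iff_getElem.1 h
          have hilen : i < others.length := lt_of_lt_of_le hi (by simp [List.length_take])
          subst hx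
          rw [List.getElem_take, pvBuildMap_getD_mem t _ hnd i hilen,
            ← List.getElem_take (h := hi),
            pvBuildMap_getD_mem t _ (hnd.sublist (List.take_sublist _ _)) i hi]
      rw [List.foldl_cons,
        show pvStepA (pvBuildMap t (others.take k), (k : Int), enc) x
          = (pvBuildMap t (others.take k), (k : Int),
             enc ++ [(pvBuildMap t (others.take k)).getD x '?']) by
          simp [pvStepA, hc],
        ih k _ hseen', hval]
      simp
    · -- x is new: it must be others[k]
      have hnot : ¬ (x = t ∨ x ∈ others.take k) := fun h => hc ((pvBuildMap_contains t _ x).2 h)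
      have hseen' : pvSeen t xs (others.take k ++ [x]) = others := by
        have hstep : pvSeen t (x :: xs) (others.take k)
            = pvSeen t xs (others.take k ++ [x]) := by
          simp only [pvSeen, List.foldl_cons, if_neg hnot]
        rw [← hstep]; exact hseen
      have hpre : (others.take k ++ [x]) <+: others := by
        have hp := pvSeen_prefix t xs (others.take k ++ [x])
        rwa [hseen'] at hp
      have hklen : k < others.length := by
        have hl := hpre.length_le
        simp [List.length_take] at hl
        omega
      have hlen : (others.take k).length = k := by simp [List.length_take]; omega
      have hxlen : k < (others.take k ++ [x]).length := by simp [hlen]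
      have hx : x = others[k] := by
        have h1 := List.IsPrefix.getElem hpre hxlen
        rw [List.getElem_append_right (by omega)] at h1
        simpa [hlen] using h1
      have htake : others.take k ++ [x] = others.take (k + 1) := by
        have h1 := List.prefix_iff_eq_take.1 hpre
        rw [h1]
        congr 1
        simp [hlen]
      have hmap : (pvBuildMap t (others.take k)).insert x (pvLetter k)
          = pvBuildMap t (others.take (k + 1)) := by
        rw [← htake, pvBuildMap_snoc, hlen]
      have hcfalse : (pvBuildMap t (others.take k)).contains x = false := by
        simpa using hc
      rw [List.foldl_cons,
        show pvStepA (pvBuildMap t (others.take k), (k : Int), enc) x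
          = (pvBuildMap t (others.take (k + 1)), ((k : Int) + 1), enc ++ [pvLetter k]) by
          simp only [pvStepA, hcfalse, Bool.false_eq_true, if_false]
          rw [hmap]
          simp [← hmap, PySem.Dict.getD_insert_self],
        show ((k : Int) + 1) = ((k + 1 : Nat) : Int) by push_cast; ring,
        ih (k + 1) _ (htake ▸ hseen')]
      have hvalB : (pvBuildMap t others).getD x '?' = pvLetter k := by
        rw [hx, pvBuildMap_getD_mem t _ hnd k hklen]
      simp [hvalB]

-- bridge: B's stateless per-position code equals the table lookup
lemma pvPointwise (players : List String) (t p : String) (hp : p ∈ players) (hpt : p ≠ t) :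
    ∃ (i : Nat) (h : i < ((PySem.List.dedup players).filter (fun q => q ≠ t)).length),
      ((PySem.List.dedup players).filter (fun q => q ≠ t))[i] = p ∧
      i = (PySem.Set.ofList
            ((players.take ((PySem.List.index? players p).getD 0)).filter
              (fun q => q ≠ t))).length := by
  obtain ⟨j, hj⟩ := Option.isSome_iff_exists.1 ((PySem.List.index?_isSome_iff players p).2 hp)
  obtain ⟨pre, suf, hsplit, hlenpre, hppre⟩ := ((PySem.List.index?_eq_some_iff players p j).1 hj)
  have htake : players.take ((PySem.List.index? players p).getD 0) = pre := by
    rw [hj, Option.getD_some, ← hlenpre, hsplit, List.take_left]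
  have hppre' : p ∉ PySem.Set.ofList pre := fun h => hppre ((PySem.Set.mem_ofList pre p).1 h)
  have hS : PySem.List.dedup players
      = (PySem.Set.ofList pre ++ [p])
        ++ (PySem.Set.ofList suf).filter
             (fun y => !(PySem.Set.contains (PySem.Set.ofList pre ++ [p]) y)) := by
    rw [PySem.List.dedup_eq_ofList, hsplit,
      show pre ++ p :: suf = (pre ++ [p]) ++ suf by simp,
      PySem.Set.ofList_append, PySem.Set.ofList_append_singleton,
      PySem.Set.add_of_not_mem hppre', PySem.Set.update_eq_append_filter]
  set q : String → Bool := fun x => decide (x ≠ t) with hq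
  have hqp : q p = true := by simp [hq, hpt]
  set L := (PySem.Set.ofList pre).filter q with hL
  set R := ((PySem.Set.ofList suf).filter
      (fun y => !(PySem.Set.contains (PySem.Set.ofList pre ++ [p]) y))).filter q with hR
  have hothers : (PySem.List.dedup players).filter q = L ++ p :: R := by
    rw [hS, List.filter_append, List.filter_append,
      show List.filter q [p] = [p] by simp [hqp]]
    simp only [List.append_assoc, List.singleton_append]
    rfl
  refine ⟨L.length, ?_, ?_, ?_⟩
  · rw [hothers]; simp
  · rw [List.getElem_of_eq hothers, List.getElem_append_right (le_refl _)]
    simp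
  · rw [htake, ← pvFilter_ofList, hL]

-- ===== VERDICT (by name: the statement is the Claim_ definition above) =====
theorem encode_motif_player_centric_spec : Claim_equal_encode_motif_player_centric := by
  intro players t _ _
  unfold Spec_encode_motif_player_centric encode_motif_player_centric encode_motif_player_centric_alt
  set others := (PySem.List.dedup players).filter (fun p => p ≠ t) with hothers
  have hnd : others.Nodup := by
    rw [hothers, PySem.List.dedup_eq_ofList]
    exact (PySem.Set.nodup_ofList players).filter _
  have hnt : ∀ p ∈ others, p ≠ t := by
    intro p hp
    have := (List.mem_filter.1 (hothers ▸ hp)).2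
    simpa using this
  have hseen : pvSeen t players (others.take 0) = others := by
    rw [List.take_zero, pvSeen_eq_update, PySem.Set.update_nil_left, hothers,
      PySem.List.dedup_eq_ofList, pvFilter_ofList]
  have h0 : (PySem.Dict.ofList [(t, 'A')] : PySem.Dict String Char)
      = pvBuildMap t (others.take 0) := by rw [List.take_zero, pvBuildMap_nil]
  have hA := pvMainA t others hnd hnt players 0 [] hseen
  simp only [List.take_zero] at hA h0 ⊢
  rw [h0]
  rw [show ((0 : Int)) = ((0 : Nat) : Int) by norm_num]
  rw [hA]
  simp only [List.nil_append]
  congr 1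
  apply List.map_congr_left
  intro p hp
  by_cases hpt : p = t
  · have ht : t ∉ others := fun hm => hnt t hm rfl
    rw [hpt, pvBuildMap_getD_target t others ht]
    simp [pvCodeB]
  · obtain ⟨i, hi, hgi, hrank⟩ := pvPointwise players t p hp hpt
    have hi' : i < others.length := hi
    have hgi' : others[i]'hi' = p := hgi
    rw [← hgi', pvBuildMap_getD_mem t others hnd i hi', hgi']
    simp only [pvCodeB, if_neg hpt]
    rw [← hrank]
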